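-- pv_equiv track=rewrite | github.com/joshrkay/Shopify-analytics-app-phase1 | backend/src/constants/permissions.py | get_primary_role_category
-- ===== SOURCE A (Python) =====
-- from enum import Enum
--
-- class Role(str, Enum):
--     """
--     User roles from Clerk.
--
--     Keep in sync with Clerk organization role configuration.
--
--     Role Categories:
--     - Merchant roles: Single-tenant access for store owners/staff
--     - Agency roles: Multi-tenant access for agencies managing multiple stores
--     - Platform roles: Legacy roles maintained for backward compatibility
--     """
--     # Platform roles (legacy, backward compatible)
--     ADMIN = "admin"
--     OWNER = "owner"
--     EDITOR = "editor"
--     VIEWER = "viewer"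
--
--     # Merchant roles (single tenant)
--     MERCHANT_ADMIN = "merchant_admin"
--     MERCHANT_VIEWER = "merchant_viewer"
--
--     # Agency roles (multi-tenant)
--     AGENCY_ADMIN = "agency_admin"
--     AGENCY_VIEWER = "agency_viewer"
--
--     # Super admin (platform-level)
--     SUPER_ADMIN = "super_admin"
--
-- class RoleCategory(str, Enum):
--     """
--     Role categories for determining tenant access scope.
--     """
--     MERCHANT = "merchant"  # Single tenant_id access
--     AGENCY = "agency"      # Multiple tenant_ids via allowed_tenants[]
--     PLATFORM = "platform"  # Legacy platform roles
--
-- ROLE_CATEGORIES = {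
--     Role.MERCHANT_ADMIN: RoleCategory.MERCHANT,
--     Role.MERCHANT_VIEWER: RoleCategory.MERCHANT,
--     Role.AGENCY_ADMIN: RoleCategory.AGENCY,
--     Role.AGENCY_VIEWER: RoleCategory.AGENCY,
--     Role.ADMIN: RoleCategory.PLATFORM,
--     Role.OWNER: RoleCategory.PLATFORM,
--     Role.EDITOR: RoleCategory.PLATFORM,
--     Role.VIEWER: RoleCategory.PLATFORM,
--     Role.SUPER_ADMIN: RoleCategory.PLATFORM,
-- }
--
-- def get_primary_role_category(roles: list[str]) -> RoleCategory:
--     """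
--     Determine the primary role category for a list of roles.
--
--     Priority: AGENCY > MERCHANT > PLATFORM (to ensure multi-tenant access is respected)
--     """
--     has_agency = False
--     has_merchant = False
--
--     for role_name in roles:
--         try:
--             role = Role(role_name.lower())
--             category = ROLE_CATEGORIES.get(role, RoleCategory.PLATFORM)
--             if category == RoleCategory.AGENCY:
--                 has_agency = True
--             elif category == RoleCategory.MERCHANT:
--                 has_merchant = True
--         except ValueError:
--             continue
--
--     if has_agency:
--         return RoleCategory.AGENCY
--     if has_merchant:
--         return RoleCategory.MERCHANT
--     return RoleCategory.PLATFORM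
-- ===== SOURCE B (Python) =====
-- from enum import Enum
--
-- class Role(str, Enum):
--     ADMIN = "admin"
--     OWNER = "owner"
--     EDITOR = "editor"
--     VIEWER = "viewer"
--     MERCHANT_ADMIN = "merchant_admin"
--     MERCHANT_VIEWER = "merchant_viewer"
--     AGENCY_ADMIN = "agency_admin"
--     AGENCY_VIEWER = "agency_viewer"
--     SUPER_ADMIN = "super_admin"
--
-- class RoleCategory(str, Enum):
--     MERCHANT = "merchant"
--     AGENCY = "agency"
--     PLATFORM = "platform"
--
-- _AGENCY_ROLES = {"agency_admin", "agency_viewer"}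
-- _MERCHANT_ROLES = {"merchant_admin", "merchant_viewer"}
--
-- def get_primary_role_category(roles: list[str]) -> RoleCategory:
--     lowered = [r.lower() for r in roles]
--     if any(r in _AGENCY_ROLES for r in lowered):
--         return RoleCategory.AGENCY
--     if any(r in _MERCHANT_ROLES for r in lowered):
--         return RoleCategory.MERCHANT
--     return RoleCategory.PLATFORM
-- ===== Notes on version B (the rewrite author's own statement) =====
-- stated objective: idiomatic
-- what changed: Replaced the single flag-accumulating loop with enum round-trips per element by priority-ordered short-circuiting membership scans over precomputed role-name sets.
import Mathlib
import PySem

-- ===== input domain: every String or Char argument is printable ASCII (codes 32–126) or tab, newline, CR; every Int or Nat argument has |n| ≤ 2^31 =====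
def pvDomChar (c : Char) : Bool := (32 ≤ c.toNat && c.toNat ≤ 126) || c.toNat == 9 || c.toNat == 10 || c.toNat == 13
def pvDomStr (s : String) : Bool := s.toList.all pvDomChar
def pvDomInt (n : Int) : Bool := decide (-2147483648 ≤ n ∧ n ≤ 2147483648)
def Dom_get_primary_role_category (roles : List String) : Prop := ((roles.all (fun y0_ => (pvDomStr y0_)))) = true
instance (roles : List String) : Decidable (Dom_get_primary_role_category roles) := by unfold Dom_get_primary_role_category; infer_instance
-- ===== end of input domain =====

-- B replaces A's single flag-accumulating loop by two priority-ordered short-circuiting membership scans (idiomatic).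

-- ===== PORT A =====
-- A's ROLE_CATEGORIES lookup: valid role values map to their category, invalid role names raise ValueError (skipped)
def pvRoleCategory? (r : String) : Option String :=
  if r = "merchant_admin" ∨ r = "merchant_viewer" then some "merchant"
  else if r = "agency_admin" ∨ r = "agency_viewer" then some "agency"
  else if r = "admin" ∨ r = "owner" ∨ r = "editor" ∨ r = "viewer" ∨ r = "super_admin" then some "platform"
  else none  -- Role(role_name) raises ValueError → continue

def get_primary_role_category (roles : List String) : String :=
  let st := roles.foldl (fun (st : Bool × Bool) role_name =>
    match pvRoleCategory? (PySem.Str.lower role_name) with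
    | none => st  -- except ValueError: continue
    | some category =>
      if category = "agency" then (true, st.2)
      else if category = "merchant" then (st.1, true)
      else st) (false, false)
  if st.1 then "agency" else if st.2 then "merchant" else "platform"

-- ===== PORT B =====
def pvAgencyRoles : List String := ["agency_admin", "agency_viewer"]
def pvMerchantRoles : List String := ["merchant_admin", "merchant_viewer"]

def get_primary_role_category_alt (roles : List String) : String :=
  let lowered := roles.map PySem.Str.lower
  if lowered.any (fun r => pvAgencyRoles.contains r) then "agency"
  else if lowered.any (fun r => pvMerchantRoles.contains r) then "merchant"
  else "platform"

-- ===== PRECONDITION & SPEC =====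
def Spec_get_primary_role_category (roles : List String) (out : String) : Prop := out = get_primary_role_category_alt roles
instance (roles : List String) (out : String) : Decidable (Spec_get_primary_role_category roles out) := by unfold Spec_get_primary_role_category; infer_instance

-- ===== CLAIM (what is proved, stated in full; the proofs are below) =====
def Claim_equal_get_primary_role_category : Prop := ∀ (roles : List String), Dom_get_primary_role_category roles → Spec_get_primary_role_category roles (get_primary_role_category roles)

-- ===== LEMMAS AND PROOFS =====

-- the loop invariant: the folded flag pair is (seed ∨ some agency role seen, seed ∨ some merchant role seen)
theorem pv_fold_inv (roles : List String) (a m : Bool) :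
    roles.foldl (fun (st : Bool × Bool) role_name =>
      match pvRoleCategory? (PySem.Str.lower role_name) with
      | none => st
      | some category =>
        if category = "agency" then (true, st.2)
        else if category = "merchant" then (st.1, true)
        else st) (a, m)
    = (a || roles.any (fun r => pvAgencyRoles.contains (PySem.Str.lower r)),
       m || roles.any (fun r => pvMerchantRoles.contains (PySem.Str.lower r))) := by
  induction roles generalizing a m with
  | nil => simp
  | cons x xs ih =>
    simp only [List.foldl_cons, List.any_cons]
    by_cases hA : PySem.Str.lower x ∈ pvAgencyRoles
    · have hM' : PySem.Str.lower x ∉ pvMerchantRoles := by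
        simp [pvAgencyRoles] at hA
        rcases hA with h | h <;> simp [pvMerchantRoles, h]
      have hcat : pvRoleCategory? (PySem.Str.lower x) = some "agency" := by
        have hA2 := hA
        simp [pvAgencyRoles] at hA2
        rcases hA2 with h | h <;> simp [pvRoleCategory?, h]
      rw [hcat]; simp only [reduceIte]
      rw [ih]; simp [hA, hM']
    · by_cases hM : PySem.Str.lower x ∈ pvMerchantRoles
      · have hcat : pvRoleCategory? (PySem.Str.lower x) = some "merchant" := by
          have hM2 := hM
          simp [pvMerchantRoles] at hM2
          rcases hM2 with h | h <;> simp [pvRoleCategory?, h]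
        rw [hcat]; simp only [reduceIte]
        rw [ih]; simp [hA, hM]
      · have hgood : ∀ c, pvRoleCategory? (PySem.Str.lower x) = some c → c ≠ "agency" ∧ c ≠ "merchant" := by
          intro c hc
          simp [pvAgencyRoles, pvMerchantRoles] at hA hM
          simp [pvRoleCategory?] at hc
          split_ifs at hc with h1 h2 h3
          · exact absurd h1 (by simp [hM.1, hM.2])
          · exact absurd h2 (by simp [hA.1, hA.2])
          · injection hc with h; subst h; simp
        rcases hcase : pvRoleCategory? (PySem.Str.lower x) with _ | c
        · simp only [ih]; simp [List.contains_eq_mem, hA, hM]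
        · obtain ⟨h1, h2⟩ := hgood c hcase
          simp only [if_neg h1, if_neg h2, ih]; simp [hA, hM]
-- ===== VERDICT (by name: the statement is the Claim_ definition above) =====
theorem get_primary_role_category_spec : Claim_equal_get_primary_role_category := by
  intro roles _
  unfold Spec_get_primary_role_category get_primary_role_category get_primary_role_category_alt
  simp only [pv_fold_inv, Bool.false_or, List.any_map]
  rfl
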